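-- pv_equiv track=rewrite | github.com/yangyungit/valuation-radar-ui | pages/5_个股择时.py | _get_holding_periods
-- ===== SOURCE A (Python) =====
-- def _get_holding_periods(cls_map: dict, ticker: str) -> list:
--     periods: list = []
--     in_h, start, prev = False, None, None
--     for m in sorted(cls_map.keys()):
--         if ticker in cls_map[m]:
--             if not in_h:
--                 start = m
--                 in_h = True
--             prev = m
--         elif in_h:
--             periods.append((start, prev))
--             in_h = False
--     if in_h:
--         periods.append((start, prev))
--     return periods
-- ===== SOURCE B (Python) =====
-- def _get_holding_periods(cls_map: dict, ticker: str) -> list: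
--     # Run-partitioning two-pointer scan: instead of A's in_h/start/prev flag
--     # state machine, find each contiguous held run [i..j-1] directly and emit
--     # one (first, last) pair per run; no trailing-flush special case needed.
--     months = sorted(cls_map.keys())
--     periods: list = []
--     i, n = 0, len(months)
--     while i < n:
--         if ticker in cls_map[months[i]]:
--             j = i + 1
--             while j < n and ticker in cls_map[months[j]]:
--                 j += 1
--             periods.append((months[i], months[j - 1]))
--             i = j
--         else:
--             i += 1
--     return periods
-- ===== Notes on version B (the rewrite author's own statement) =====
-- stated objective: alternative
-- what changed: Replaced the in_h/start/prev boolean state machine (with a trailing flush after the loop) by a two-pointer run scan that locates each contiguous held run of sorted months directly and emits one (first,last) pair per run.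
import Mathlib
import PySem

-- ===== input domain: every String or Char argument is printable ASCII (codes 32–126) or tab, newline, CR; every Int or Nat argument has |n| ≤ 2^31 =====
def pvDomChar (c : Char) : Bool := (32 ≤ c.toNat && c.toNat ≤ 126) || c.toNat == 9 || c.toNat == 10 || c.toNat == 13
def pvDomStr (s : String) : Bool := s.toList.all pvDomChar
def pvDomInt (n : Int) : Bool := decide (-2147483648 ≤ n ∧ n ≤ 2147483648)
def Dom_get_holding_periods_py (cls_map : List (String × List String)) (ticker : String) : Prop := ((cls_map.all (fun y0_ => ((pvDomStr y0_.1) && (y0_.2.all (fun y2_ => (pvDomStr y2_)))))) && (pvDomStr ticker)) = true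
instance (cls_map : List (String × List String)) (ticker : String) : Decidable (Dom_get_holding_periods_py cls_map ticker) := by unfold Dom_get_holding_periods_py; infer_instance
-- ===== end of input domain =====

-- B replaces A's in_h/start/prev flag state machine by a run-partitioning scan
-- that emits one (first, last) pair per contiguous held run (alternative decomposition).


-- ===== PORT A =====
-- `ticker in cls_map[m]` for a month m drawn from cls_map's keys (always present, so getD is exact)
def pvHeld (cls_map : List (String × List String)) (ticker m : String) : Bool :=
  ((PySem.Dict.mk cls_map).getD m []).contains ticker

-- loop state: (periods, in_h, start, prev); start/prev are Option since Python initialises them to None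
def aStep (f : String → Bool)
    (st : List (String × String) × Bool × Option String × Option String) (m : String) :
    List (String × String) × Bool × Option String × Option String :=
  if f m then
    (st.1, true, if st.2.1 then st.2.2.1 else some m, some m)
  else if st.2.1 then
    -- in_h implies start/prev are some, so getD "" is exact
    (st.1 ++ [(st.2.2.1.getD "", st.2.2.2.getD "")], false, st.2.2.1, st.2.2.2)
  else st

-- the trailing `if in_h: periods.append((start, prev))`
def aFinish (st : List (String × String) × Bool × Option String × Option String) :
    List (String × String) :=
  if st.2.1 then st.1 ++ [(st.2.2.1.getD "", st.2.2.2.getD "")] else st.1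

def get_holding_periods_py (cls_map : List (String × List String)) (ticker : String) :
    List (String × String) :=
  aFinish ((PySem.List.sorted ((PySem.Dict.mk cls_map).keys) (fun x => x) false).foldl
    (aStep (pvHeld cls_map ticker)) ([], false, none, none))

-- ===== PORT B =====
-- Source B's outer while over i is the recursion on the remaining month list; its inner
-- `while j < n and held(months[j])` run scan is takeWhile/dropWhile on the rest.
-- fuel (initialised to the list length) only makes the recursion structural; with
-- fuel ≥ length the 0-fuel arm is unreachable.
def pvPeriodsOf (f : String → Bool) : Nat → List String → List (String × String)
  | _, [] => []
  | 0, _ :: _ => []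
  | fuel+1, m :: rest =>
    if f m then
      (m, (rest.takeWhile f).getLastD m) :: pvPeriodsOf f fuel (rest.dropWhile f)
    else
      pvPeriodsOf f fuel rest

def get_holding_periods_py_alt (cls_map : List (String × List String)) (ticker : String) :
    List (String × String) :=
  let months := PySem.List.sorted ((PySem.Dict.mk cls_map).keys) (fun x => x) false
  pvPeriodsOf (pvHeld cls_map ticker) months.length months

-- ===== PRECONDITION & SPEC =====
def Spec_get_holding_periods_py (cls_map : List (String × List String)) (ticker : String) (out : List (String × String)) : Prop := out = get_holding_periods_py_alt cls_map ticker
instance (cls_map : List (String × List String)) (ticker : String) (out : List (String × String)) : Decidable (Spec_get_holding_periods_py cls_map ticker out) := by unfold Spec_get_holding_periods_py; infer_instance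

-- ===== CLAIM (what is proved, stated in full; the proofs are below) =====
def Claim_equal_get_holding_periods_py : Prop := ∀ (cls_map : List (String × List String)) (ticker : String), Dom_get_holding_periods_py cls_map ticker → Spec_get_holding_periods_py cls_map ticker (get_holding_periods_py cls_map ticker)

-- ===== LEMMAS AND PROOFS =====

lemma pvPeriodsOf_nil (f : String → Bool) (fuel : Nat) : pvPeriodsOf f fuel [] = [] := by
  cases fuel <;> rfl

lemma pvPeriodsOf_fuel (f : String → Bool) :
    ∀ fuel fuel' ms, ms.length ≤ fuel → ms.length ≤ fuel' →
      pvPeriodsOf f fuel ms = pvPeriodsOf f fuel' ms := by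
  intro fuel
  induction fuel with
  | zero =>
    intro fuel' ms h _
    have : ms = [] := List.eq_nil_of_length_eq_zero (Nat.le_zero.mp h)
    subst this
    simp [pvPeriodsOf_nil]
  | succ n ih =>
    intro fuel' ms h h'
    cases ms with
    | nil => simp [pvPeriodsOf_nil]
    | cons m r =>
      cases fuel' with
      | zero => simp at h'
      | succ n' =>
        have hr : r.length ≤ n := by simpa using h
        have hr' : r.length ≤ n' := by simpa using h'
        by_cases hm : f m
        · have hd : (r.dropWhile f).length ≤ r.length := List.length_dropWhile_le f r
          simp only [pvPeriodsOf, hm, if_pos]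
          rw [ih n' (r.dropWhile f) (le_trans hd hr) (le_trans hd hr')]
        · simp only [pvPeriodsOf, hm, if_neg, Bool.false_eq_true, not_false_iff]
          exact ih n' r hr hr'

-- canonical (fuel = length) form, proof-only
def pvP (f : String → Bool) (ms : List String) : List (String × String) :=
  pvPeriodsOf f ms.length ms

lemma pvP_nil (f : String → Bool) : pvP f [] = [] := rfl

lemma pvP_cons_pos (f : String → Bool) (m : String) (r : List String) (h : f m = true) :
    pvP f (m :: r) = (m, (r.takeWhile f).getLastD m) :: pvP f (r.dropWhile f) := by
  unfold pvP
  simp only [List.length_cons, pvPeriodsOf, h, if_pos]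
  rw [pvPeriodsOf_fuel f r.length (r.dropWhile f).length (r.dropWhile f)
    (List.length_dropWhile_le f r) (le_refl _)]

lemma pvP_cons_neg (f : String → Bool) (m : String) (r : List String) (h : f m = false) :
    pvP f (m :: r) = pvP f r := by
  unfold pvP
  simp only [List.length_cons, pvPeriodsOf, h]
  rfl

lemma pvMain (f : String → Bool) :
    ∀ ms : List String,
      (∀ (P : List (String × String)) (s p : Option String),
        aFinish (ms.foldl (aStep f) (P, false, s, p)) = P ++ pvP f ms) ∧
      (∀ (P : List (String × String)) (st pv : String),
        aFinish (ms.foldl (aStep f) (P, true, some st, some pv)) =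
          P ++ (st, (ms.takeWhile f).getLastD pv) :: pvP f (ms.dropWhile f)) := by
  intro ms
  induction ms with
  | nil =>
    constructor
    · intro P s p; simp [aFinish, pvP_nil]
    · intro P st pv; simp [aFinish, pvP_nil]
  | cons m r ih =>
    obtain ⟨ihF, ihT⟩ := ih
    constructor
    · intro P s p
      by_cases hm : f m
      · simp only [List.foldl_cons, aStep, hm, if_pos, Bool.false_eq_true]
        rw [if_neg not_false, ihT P m m, pvP_cons_pos f m r hm]
      · simp only [List.foldl_cons, aStep, hm, Bool.false_eq_true, if_neg, not_false_iff]
        rw [ihF P s p, pvP_cons_neg f m r (by simpa using hm)]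
    · intro P st pv
      by_cases hm : f m
      · simp only [List.foldl_cons, aStep, hm, if_pos]
        rw [ihT P st m, List.takeWhile_cons_of_pos hm, List.dropWhile_cons_of_pos hm,
          List.getLastD_cons]
      · simp only [List.foldl_cons, aStep, hm, Bool.false_eq_true, if_neg, not_false_iff,
          Option.getD_some]
        rw [if_pos trivial, ihF (P ++ [(st, pv)]) (some st) (some pv)]
        rw [List.dropWhile_cons_of_neg (by simp [hm]), pvP_cons_neg f m r (by simpa using hm)]
        simp [hm]

-- ===== VERDICT (by name: the statement is the Claim_ definition above) =====
theorem get_holding_periods_py_spec : Claim_equal_get_holding_periods_py := by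
  intro cls_map ticker _
  unfold Spec_get_holding_periods_py get_holding_periods_py get_holding_periods_py_alt
  rw [(pvMain (pvHeld cls_map ticker)
    (PySem.List.sorted ((PySem.Dict.mk cls_map).keys) (fun x => x) false)).1 [] none none]
  simp [pvP]
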